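-- pv_equiv track=rewrite | github.com/itu-bioinformatics-database-lab/CovMutEx | genome_extractor/genome/feature_extractor.py | get_affected_positions
-- ===== SOURCE A (Python) =====
-- def get_affected_positions(mutations, genome_len, k, protein_regions=None):
--     """
--     Get positions affected by mutations within the k-mer window and protein region.
--     Only returns positions that actually need feature recomputation.
--
--     Args:
--         mutations (list): List of mutation tuples (position, ref, alt, aa_pos, aa_change)
--         genome_len (int): Length of genome sequence
--         k (int): Size of k-mer window
--         protein_regions (dict): Optional dictionary of protein regions with protein name as key
--                                 and (start, end) tuple as value
--
--     Returns:
--         set: Positions requiring feature recomputation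
--     """
--     affected_positions = set()
--     mid_point = k // 2
--
--     for position, ref, alt, aa_pos, aa_change in mutations:
--         pos = position - 1  # Convert to 0-based indexing
--
--         # If protein region specified, skip mutations outside it
--         if protein_regions:
--             # Iterate over all the protein regions
--             for region_start, region_end in protein_regions.values():
--                 if region_start <= pos <= region_end:
--                     break
--             else:
--                 continue  # Skip mutation if it's outside all provided protein regions
--
--         # Add positions within k-mer window that need updating
--         window_start = max(0, pos - mid_point)
--         window_end = min(genome_len, pos + mid_point + 1)
--
--         # Only add positions that actually need feature updates
--         for idx in range(window_start, window_end):
--             # If within protein region constraint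
--             if not protein_regions or any(region_start <= idx <= region_end for region_start, region_end in protein_regions.values()):
--                 affected_positions.add(idx)
--
--     return sorted(affected_positions)
-- ===== SOURCE B (Python) =====
-- def get_affected_positions(mutations, genome_len, k, protein_regions=None):
--     """Interval-sweep rewrite: collect window/region intersection intervals,
--     sort them by start, then emit positions in one de-duplicating sweep."""
--     mid = k // 2
--     regions = list(protein_regions.values()) if protein_regions else None
--     intervals = []
--     for position, ref, alt, aa_pos, aa_change in mutations:
--         pos = position - 1
--         ws = max(0, pos - mid)
--         we = min(genome_len, pos + mid + 1)
--         if regions is None: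
--             intervals.append((ws, we))
--         elif any(rs <= pos <= re for rs, re in regions):
--             intervals.extend((max(ws, rs), min(we, re + 1)) for rs, re in regions)
--     intervals.sort(key=lambda iv: iv[0])
--     out = []
--     cur = None
--     for s, e in intervals:
--         start = s if cur is None else max(s, cur)
--         out.extend(range(start, e))
--         cur = e if cur is None else max(cur, e)
--     return out
-- ===== Notes on version B (the rewrite author's own statement) =====
-- stated objective: faster
-- what changed: A builds a set by testing every index of each k-window against every region and sorts it at the end; B instead collects the window/region intersection intervals per mutation, sorts the intervals by start, and emits the already-sorted de-duplicated positions in one sweep with a cursor (no set, no per-index region tests, no final sort of positions).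
import Mathlib
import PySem

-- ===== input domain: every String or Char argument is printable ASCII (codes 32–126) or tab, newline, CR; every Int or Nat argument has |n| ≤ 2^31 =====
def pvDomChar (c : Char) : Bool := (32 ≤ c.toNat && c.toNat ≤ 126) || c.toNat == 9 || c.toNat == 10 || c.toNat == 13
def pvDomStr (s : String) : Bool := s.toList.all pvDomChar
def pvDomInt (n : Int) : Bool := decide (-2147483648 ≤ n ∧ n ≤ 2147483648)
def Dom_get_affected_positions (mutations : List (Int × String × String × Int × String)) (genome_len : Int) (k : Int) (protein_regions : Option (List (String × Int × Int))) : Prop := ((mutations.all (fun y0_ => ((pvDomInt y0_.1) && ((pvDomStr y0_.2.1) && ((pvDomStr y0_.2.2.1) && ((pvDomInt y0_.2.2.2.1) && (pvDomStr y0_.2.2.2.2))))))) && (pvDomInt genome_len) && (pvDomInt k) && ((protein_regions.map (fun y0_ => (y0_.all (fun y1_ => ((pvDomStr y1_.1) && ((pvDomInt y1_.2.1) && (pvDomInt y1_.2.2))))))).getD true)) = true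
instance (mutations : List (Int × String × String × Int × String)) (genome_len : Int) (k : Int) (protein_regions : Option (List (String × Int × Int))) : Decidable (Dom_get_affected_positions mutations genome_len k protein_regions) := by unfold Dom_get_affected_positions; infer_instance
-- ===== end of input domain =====

-- B replaces A's per-index, per-region set construction by interval arithmetic:
-- collect the window/region intersection intervals, sort them by start, and emit
-- the positions in one de-duplicating sweep (objective: faster).

-- ===== PORT A =====
-- A's per-mutation body: skip mutation if regions are given and none contains pos,
-- then add every window index that lies in some region (or any index if no regions).
def pvAStep (regions : List (Int × Int)) (genome_len mid_point : Int)
    (s : PySem.Set Int) (m : Int × String × String × Int × String) : PySem.Set Int :=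
  let pos := m.1 - 1
  let window : PySem.Set Int → PySem.Set Int := fun s =>
    let window_start := max 0 (pos - mid_point)
    let window_end := min genome_len (pos + mid_point + 1)
    (PySem.List.pyRange window_start window_end 1).foldl
      (fun s idx =>
        if regions.isEmpty || regions.any (fun r => decide (r.1 ≤ idx) && decide (idx ≤ r.2))
        then PySem.Set.add s idx else s) s
  if !regions.isEmpty then
    if regions.any (fun r => decide (r.1 ≤ pos) && decide (pos ≤ r.2)) then window s else s
  else window s

def get_affected_positions (mutations : List (Int × String × String × Int × String)) (genome_len : Int) (k : Int) (protein_regions : Option (List (String × Int × Int))) : List Int :=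
  -- protein_regions is a Python dict: its .values() in insertion order
  let regions : List (Int × Int) := match protein_regions with
    | none => []
    | some l => (PySem.Dict.ofList l).values
  let mid_point := PySem.Int.floordiv k 2
  let affected_positions : PySem.Set Int :=
    mutations.foldl (pvAStep regions genome_len mid_point) PySem.Set.empty
  PySem.List.sorted affected_positions (fun x => x) false

-- ===== PORT B =====
-- B's first pass: per mutation, append the interval(s) window ∩ region (the whole
-- window if no regions; nothing if regions are given and none contains pos).
def pvBIntervals (regions? : Option (List (Int × Int))) (genome_len mid : Int)
    (acc : List (Int × Int)) (m : Int × String × String × Int × String) : List (Int × Int) :=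
  let pos := m.1 - 1
  let ws := max 0 (pos - mid)
  let we := min genome_len (pos + mid + 1)
  match regions? with
  | none => acc ++ [(ws, we)]
  | some regs =>
    if regs.any (fun r => decide (r.1 ≤ pos) && decide (pos ≤ r.2)) then
      acc ++ regs.map (fun r => (max ws r.1, min we (r.2 + 1)))
    else acc

-- B's second pass: sweep the start-sorted intervals, emitting each position once
-- (cur = 1 + the largest position that can already have been emitted).
def pvBSweep (st : Option Int × List Int) (iv : Int × Int) : Option Int × List Int :=
  let start := match st.1 with | none => iv.1 | some c => max iv.1 c
  (some (match st.1 with | none => iv.2 | some c => max c iv.2),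
   st.2 ++ PySem.List.pyRange start iv.2 1)

def get_affected_positions_alt (mutations : List (Int × String × String × Int × String)) (genome_len : Int) (k : Int) (protein_regions : Option (List (String × Int × Int))) : List Int :=
  let mid := PySem.Int.floordiv k 2
  -- regions = list(protein_regions.values()) if protein_regions else None
  let regions? : Option (List (Int × Int)) := match protein_regions with
    | none => none
    | some l => if l.isEmpty then none else some ((PySem.Dict.ofList l).values)
  let intervals : List (Int × Int) :=
    mutations.foldl (pvBIntervals regions? genome_len mid) []
  let ivs := PySem.List.sorted intervals (fun iv => iv.1) false
  (ivs.foldl pvBSweep ((none : Option Int), ([] : List Int))).2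

-- ===== PRECONDITION & SPEC =====
def Spec_get_affected_positions (mutations : List (Int × String × String × Int × String)) (genome_len : Int) (k : Int) (protein_regions : Option (List (String × Int × Int))) (out : List Int) : Prop := out = get_affected_positions_alt mutations genome_len k protein_regions
instance (mutations : List (Int × String × String × Int × String)) (genome_len : Int) (k : Int) (protein_regions : Option (List (String × Int × Int))) (out : List Int) : Decidable (Spec_get_affected_positions mutations genome_len k protein_regions out) := by unfold Spec_get_affected_positions; infer_instance

-- ===== CLAIM (what is proved, stated in full; the proofs are below) =====
def Claim_equal_get_affected_positions : Prop := ∀ (mutations : List (Int × String × String × Int × String)) (genome_len : Int) (k : Int) (protein_regions : Option (List (String × Int × Int))), Dom_get_affected_positions mutations genome_len k protein_regions → Spec_get_affected_positions mutations genome_len k protein_regions (get_affected_positions mutations genome_len k protein_regions)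

-- ===== LEMMAS AND PROOFS =====

-- what one mutation contributes, independently of either program's loop shape
def pvContrib (regions : List (Int × Int)) (genome_len mid_point : Int)
    (m : Int × String × String × Int × String) (x : Int) : Prop :=
  let pos := m.1 - 1
  (max 0 (pos - mid_point) ≤ x ∧ x < min genome_len (pos + mid_point + 1)) ∧
  (regions ≠ [] →
    ((∃ r ∈ regions, r.1 ≤ pos ∧ pos ≤ r.2) ∧ ∃ r ∈ regions, r.1 ≤ x ∧ x ≤ r.2))

-- ---- A side: membership and nodup of the set fold ----

theorem pv_mem_foldl_filter_add {P : Int → Bool} {l : List Int} {s : PySem.Set Int} {x : Int} :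
    x ∈ l.foldl (fun s idx => if P idx then PySem.Set.add s idx else s) s ↔
      x ∈ s ∨ (x ∈ l ∧ P x) := by
  induction l generalizing s with
  | nil => simp
  | cons a t ih =>
    simp only [List.foldl_cons, List.mem_cons]
    by_cases h : P a = true
    · rw [if_pos h, ih]
      constructor
      · rintro (haa | ⟨hm, hp⟩)
        · rw [PySem.Set.mem_add] at haa
          rcases haa with h' | rfl
          · exact Or.inl h'
          · exact Or.inr ⟨Or.inl rfl, h⟩
        · exact Or.inr ⟨Or.inr hm, hp⟩
      · rintro (h' | ⟨(rfl | hm), hp⟩)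
        · exact Or.inl (by rw [PySem.Set.mem_add]; exact Or.inl h')
        · exact Or.inl (by rw [PySem.Set.mem_add]; exact Or.inr rfl)
        · exact Or.inr ⟨hm, hp⟩
    · rw [if_neg h, ih]
      constructor
      · rintro (h' | ⟨hm, hp⟩)
        · exact Or.inl h'
        · exact Or.inr ⟨Or.inr hm, hp⟩
      · rintro (h' | ⟨(rfl | hm), hp⟩)
        · exact Or.inl h'
        · exact absurd hp h
        · exact Or.inr ⟨hm, hp⟩

theorem pv_mem_AStep {regions : List (Int × Int)} {genome_len mid_point : Int}
    {s : PySem.Set Int} {m : Int × String × String × Int × String} {x : Int} :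
    x ∈ pvAStep regions genome_len mid_point s m ↔
      x ∈ s ∨ pvContrib regions genome_len mid_point m x := by
  unfold pvAStep pvContrib
  dsimp only
  by_cases hre : regions = []
  · subst hre
    simp only [List.isEmpty_nil, Bool.not_true, Bool.false_eq_true, if_false, Bool.true_or,
      if_true, ne_eq, not_true_eq_false, IsEmpty.forall_iff, and_true]
    rw [show (fun (s : PySem.Set Int) (idx : Int) => s.add idx)
        = (fun (s : PySem.Set Int) (idx : Int) => PySem.Set.add s (id idx)) from rfl,
      PySem.Set.mem_foldl_add]
    simp [PySem.List.mem_pyRange_one]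
  · have hne : regions.isEmpty = false := by simpa [List.isEmpty_iff] using hre
    simp only [hne, Bool.not_false, if_true, ne_eq, hre, not_false_eq_true, forall_const]
    by_cases hp : regions.any (fun r => decide (r.1 ≤ m.1 - 1) && decide (m.1 - 1 ≤ r.2))
    · simp only [hp, if_true]
      rw [pv_mem_foldl_filter_add]
      simp only [List.any_eq_true, Bool.false_or, Bool.and_eq_true, decide_eq_true_eq,
        PySem.List.mem_pyRange_one]
      have hp2 : ∃ r ∈ regions, r.1 ≤ m.1 - 1 ∧ m.1 - 1 ≤ r.2 := by
        simpa [List.any_eq_true] using hp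
      constructor
      · rintro (h | ⟨hw, hc⟩)
        · exact Or.inl h
        · exact Or.inr ⟨hw, hp2, hc⟩
      · rintro (h | ⟨hw, _, hc⟩)
        · exact Or.inl h
        · exact Or.inr ⟨hw, hc⟩
    · simp only [hp]
      have hp2 : ¬ ∃ r ∈ regions, r.1 ≤ m.1 - 1 ∧ m.1 - 1 ≤ r.2 := by
        simpa [List.any_eq_true] using hp
      constructor
      · exact Or.inl
      · rintro (h | ⟨hw, hc, _⟩)
        · exact h
        · exact absurd hc hp2

theorem pv_mem_foldA {mutations : List (Int × String × String × Int × String)}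
    {regions : List (Int × Int)} {genome_len mid_point : Int} {s : PySem.Set Int} {x : Int} :
    x ∈ mutations.foldl (pvAStep regions genome_len mid_point) s ↔
      x ∈ s ∨ ∃ m ∈ mutations, pvContrib regions genome_len mid_point m x := by
  induction mutations generalizing s with
  | nil => simp
  | cons m t ih =>
    simp only [List.foldl_cons, List.mem_cons]
    rw [ih, pv_mem_AStep]
    constructor
    · rintro ((h | hc) | ⟨m', hm', hc⟩)
      · exact Or.inl h
      · exact Or.inr ⟨m, Or.inl rfl, hc⟩
      · exact Or.inr ⟨m', Or.inr hm', hc⟩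
    · rintro (h | ⟨m', (rfl | hm'), hc⟩)
      · exact Or.inl (Or.inl h)
      · exact Or.inl (Or.inr hc)
      · exact Or.inr ⟨m', hm', hc⟩

theorem pv_nodup_foldl_filter_add {P : Int → Bool} {l : List Int} {s : PySem.Set Int}
    (hs : s.Nodup) :
    (l.foldl (fun s idx => if P idx then PySem.Set.add s idx else s) s).Nodup := by
  induction l generalizing s with
  | nil => exact hs
  | cons a t ih =>
    simp only [List.foldl_cons]
    exact ih (by split <;> [exact PySem.Set.nodup_add _ _ hs; exact hs])

theorem pv_nodup_foldA (mutations : List (Int × String × String × Int × String))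
    (regions : List (Int × Int)) (genome_len mid_point : Int) (s : PySem.Set Int)
    (hs : s.Nodup) :
    (mutations.foldl (pvAStep regions genome_len mid_point) s).Nodup := by
  induction mutations generalizing s with
  | nil => exact hs
  | cons m t ih =>
    refine ih _ ?_
    unfold pvAStep
    dsimp only
    split
    · split
      · exact pv_nodup_foldl_filter_add hs
      · exact hs
    · exact pv_nodup_foldl_filter_add hs

-- ---- B side: what the interval list covers ----

def pvCovers (ivs : List (Int × Int)) (x : Int) : Prop := ∃ iv ∈ ivs, iv.1 ≤ x ∧ x < iv.2

theorem pv_cov_BIntervals {regions? : Option (List (Int × Int))} {genome_len mid : Int}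
    {acc : List (Int × Int)} {m : Int × String × String × Int × String} {x : Int}
    (hne : ∀ regs, regions? = some regs → regs ≠ []) :
    pvCovers (pvBIntervals regions? genome_len mid acc m) x ↔
      pvCovers acc x ∨ pvContrib (regions?.getD []) genome_len mid m x := by
  unfold pvBIntervals pvContrib pvCovers
  cases regions? with
  | none =>
    dsimp only [Option.getD_none]
    constructor
    · rintro ⟨iv, hiv, h1, h2⟩
      rcases List.mem_append.1 hiv with h | h
      · exact Or.inl ⟨iv, h, h1, h2⟩
      · rcases List.mem_singleton.1 h with rfl
        exact Or.inr ⟨⟨h1, h2⟩, by simp⟩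
    · rintro (⟨iv, hiv, h1, h2⟩ | ⟨⟨h1, h2⟩, -⟩)
      · exact ⟨iv, List.mem_append.2 (Or.inl hiv), h1, h2⟩
      · exact ⟨_, List.mem_append.2 (Or.inr (List.mem_singleton.2 rfl)), h1, h2⟩
  | some regs =>
    have hre : regs ≠ [] := hne regs rfl
    dsimp only [Option.getD_some]
    simp only [ne_eq, hre, not_false_eq_true, forall_const]
    by_cases hp : regs.any (fun r => decide (r.1 ≤ m.1 - 1) && decide (m.1 - 1 ≤ r.2))
    · simp only [hp, if_true, List.mem_append, List.mem_map]
      have hp2 : ∃ r ∈ regs, r.1 ≤ m.1 - 1 ∧ m.1 - 1 ≤ r.2 := by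
        simpa [List.any_eq_true] using hp
      constructor
      · rintro ⟨iv, (hiv | ⟨r, hr, rfl⟩), h1, h2⟩
        · exact Or.inl ⟨iv, hiv, h1, h2⟩
        · exact Or.inr ⟨by dsimp at h1 h2 ⊢; constructor <;> omega,
            hp2, r, hr, by dsimp at h1 h2 ⊢; omega⟩
      · rintro (⟨iv, hiv, h1, h2⟩ | ⟨hw, _, r, hr, h1, h2⟩)
        · exact ⟨iv, Or.inl hiv, h1, h2⟩
        · exact ⟨(max (max 0 (m.1 - 1 - mid)) r.1, min (min genome_len (m.1 - 1 + mid + 1)) (r.2 + 1)),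
            Or.inr ⟨r, hr, rfl⟩, by dsimp at hw ⊢; constructor <;> omega⟩
    · simp only [hp]
      have hp2 : ¬ ∃ r ∈ regs, r.1 ≤ m.1 - 1 ∧ m.1 - 1 ≤ r.2 := by
        simpa [List.any_eq_true] using hp
      constructor
      · exact Or.inl
      · rintro (h | ⟨hw, hc, _⟩)
        · exact h
        · exact absurd hc hp2

theorem pv_cov_foldB {mutations : List (Int × String × String × Int × String)}
    {regions? : Option (List (Int × Int))} {genome_len mid : Int}
    {acc : List (Int × Int)} {x : Int}
    (hne : ∀ regs, regions? = some regs → regs ≠ []) :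
    pvCovers (mutations.foldl (pvBIntervals regions? genome_len mid) acc) x ↔
      pvCovers acc x ∨ ∃ m ∈ mutations, pvContrib (regions?.getD []) genome_len mid m x := by
  induction mutations generalizing acc with
  | nil => simp
  | cons m t ih =>
    simp only [List.foldl_cons, List.mem_cons]
    rw [ih, pv_cov_BIntervals hne]
    constructor
    · rintro ((h | hc) | ⟨m', hm', hc⟩)
      · exact Or.inl h
      · exact Or.inr ⟨m, Or.inl rfl, hc⟩
      · exact Or.inr ⟨m', Or.inr hm', hc⟩
    · rintro (h | ⟨m', (rfl | hm'), hc⟩)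
      · exact Or.inl (Or.inl h)
      · exact Or.inl (Or.inr hc)
      · exact Or.inr ⟨m', hm', hc⟩

-- ---- B side: the sweep over start-sorted intervals ----

theorem pv_covers_cons {iv : Int × Int} {rest : List (Int × Int)} {x : Int} :
    pvCovers (iv :: rest) x ↔ (iv.1 ≤ x ∧ x < iv.2) ∨ pvCovers rest x := by
  unfold pvCovers
  constructor
  · rintro ⟨iv', hiv', h⟩
    rcases List.mem_cons.1 hiv' with rfl | h'
    · exact Or.inl h
    · exact Or.inr ⟨iv', h', h⟩
  · rintro (h | ⟨iv', h', h⟩)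
    · exact ⟨iv, List.mem_cons_self, h⟩
    · exact ⟨iv', List.mem_cons_of_mem _ h', h⟩

theorem pv_sweep (ivs : List (Int × Int)) (hs : ivs.Pairwise (fun a b => a.1 ≤ b.1))
    (cur : Option Int) (out : List Int)
    (hpw : out.Pairwise (· < ·))
    (hcur : ∀ c, cur = some c → (∀ x ∈ out, x < c) ∧
      ∃ s0, (∀ iv ∈ ivs, s0 ≤ iv.1) ∧ ∀ x, s0 ≤ x → x < c → x ∈ out)
    (hnone : cur = none → out = []) :
    (ivs.foldl pvBSweep (cur, out)).2.Pairwise (· < ·) ∧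
      ∀ x, (x ∈ (ivs.foldl pvBSweep (cur, out)).2 ↔ x ∈ out ∨ pvCovers ivs x) := by
  induction ivs generalizing cur out with
  | nil => exact ⟨hpw, fun x => by simp [pvCovers]⟩
  | cons iv rest ih =>
    obtain ⟨hhead, hrest⟩ := List.pairwise_cons.1 hs
    simp only [List.foldl_cons]
    cases cur with
    | none =>
      have hout : out = [] := hnone rfl
      subst hout
      have hstep : pvBSweep ((none : Option Int), ([] : List Int)) iv
          = (some iv.2, PySem.List.pyRange iv.1 iv.2 1) := by
        simp [pvBSweep]
      rw [hstep]
      have := ih hrest (some iv.2) (PySem.List.pyRange iv.1 iv.2 1)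
        (PySem.List.pairwise_lt_pyRange_one _ _)
        (by
          rintro c hc
          injection hc with hc; subst hc
          refine ⟨fun x hx => (PySem.List.mem_pyRange_one.1 hx).2, iv.1, hhead, ?_⟩
          intro x h1 h2
          exact PySem.List.mem_pyRange_one.2 ⟨h1, h2⟩)
        (by simp)
      refine ⟨this.1, fun x => ?_⟩
      rw [this.2 x, PySem.List.mem_pyRange_one, pv_covers_cons]
      simp only [List.not_mem_nil, false_or]
    | some c =>
      obtain ⟨hub, s0, hs0le, hs0cov⟩ := hcur c rfl
      have hstep : pvBSweep (some c, out) iv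
          = (some (max c iv.2), out ++ PySem.List.pyRange (max iv.1 c) iv.2 1) := by
        simp [pvBSweep]
      rw [hstep]
      have hpw' : (out ++ PySem.List.pyRange (max iv.1 c) iv.2 1).Pairwise (· < ·) := by
        rw [List.pairwise_append]
        refine ⟨hpw, PySem.List.pairwise_lt_pyRange_one _ _, ?_⟩
        intro x hx y hy
        have h1 := hub x hx
        have h2 := (PySem.List.mem_pyRange_one.1 hy).1
        omega
      have hmem' : ∀ x, x ∈ out ++ PySem.List.pyRange (max iv.1 c) iv.2 1 ↔
          x ∈ out ∨ (iv.1 ≤ x ∧ x < iv.2) := by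
        intro x
        simp only [List.mem_append, PySem.List.mem_pyRange_one]
        constructor
        · rintro (h | ⟨h1, h2⟩)
          · exact Or.inl h
          · exact Or.inr ⟨by omega, h2⟩
        · rintro (h | ⟨h1, h2⟩)
          · exact Or.inl h
          · by_cases hcx : c ≤ x
            · exact Or.inr ⟨by omega, h2⟩
            · exact Or.inl (hs0cov x (le_trans (hs0le iv (List.mem_cons_self)) h1) (by omega))
      have := ih hrest (some (max c iv.2)) (out ++ PySem.List.pyRange (max iv.1 c) iv.2 1)
        hpw'
        (by
          rintro c' hc'
          injection hc' with hc'; subst hc'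
          constructor
          · intro x hx
            rcases List.mem_append.1 hx with h | h
            · have := hub x h; omega
            · have := (PySem.List.mem_pyRange_one.1 h).2; omega
          · refine ⟨iv.1, fun iv' hiv' => hhead iv' hiv', ?_⟩
            intro x h1 h2
            rw [hmem' x]
            by_cases hcx : x < c
            · exact Or.inl (hs0cov x (le_trans (hs0le iv (List.mem_cons_self)) h1) hcx)
            · exact Or.inr ⟨h1, by omega⟩)
        (by simp)
      refine ⟨this.1, fun x => ?_⟩
      rw [this.2 x, hmem' x, pv_covers_cons]
      tauto

-- ---- the common core ----

theorem pv_core (mutations : List (Int × String × String × Int × String))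
    (genome_len mid : Int) (regions? : Option (List (Int × Int)))
    (hne : ∀ regs, regions? = some regs → regs ≠ []) :
    PySem.List.sorted
        (mutations.foldl (pvAStep (regions?.getD []) genome_len mid) PySem.Set.empty)
        (fun x => x) false =
      ((PySem.List.sorted (mutations.foldl (pvBIntervals regions? genome_len mid) [])
          (fun iv => iv.1) false).foldl pvBSweep ((none : Option Int), ([] : List Int))).2 := by
  set S := mutations.foldl (pvAStep (regions?.getD []) genome_len mid) PySem.Set.empty with hS
  set ivs := PySem.List.sorted (mutations.foldl (pvBIntervals regions? genome_len mid) [])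
      (fun iv => iv.1) false with hivs
  have hsorted : ivs.Pairwise (fun a b => a.1 ≤ b.1) := PySem.List.sorted_pairwise _ _
  have hsweep := pv_sweep ivs hsorted none [] List.Pairwise.nil (by simp) (fun _ => rfl)
  set Bout := (ivs.foldl pvBSweep ((none : Option Int), ([] : List Int))).2 with hB
  have hmemB : ∀ x, x ∈ Bout ↔ ∃ m ∈ mutations, pvContrib (regions?.getD []) genome_len mid m x := by
    intro x
    rw [hsweep.2 x]
    have hperm : ivs.Perm (mutations.foldl (pvBIntervals regions? genome_len mid) []) :=
      PySem.List.sorted_perm _ _ _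
    have hcov : pvCovers ivs x ↔
        pvCovers (mutations.foldl (pvBIntervals regions? genome_len mid) []) x := by
      unfold pvCovers
      exact ⟨fun ⟨iv, h1, h2⟩ => ⟨iv, hperm.mem_iff.1 h1, h2⟩,
        fun ⟨iv, h1, h2⟩ => ⟨iv, hperm.mem_iff.2 h1, h2⟩⟩
    rw [hcov, pv_cov_foldB hne]
    simp [pvCovers]
  have hmemS : ∀ x, x ∈ S ↔ ∃ m ∈ mutations, pvContrib (regions?.getD []) genome_len mid m x := by
    intro x
    rw [hS, pv_mem_foldA]
    simp [PySem.Set.empty]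
  have hnodupB : Bout.Nodup := hsweep.1.imp ne_of_lt
  have hnodupS : S.Nodup := pv_nodup_foldA _ _ _ _ _ List.nodup_nil
  have hperm : Bout.Perm S :=
    (List.perm_ext_iff_of_nodup hnodupB hnodupS).2 (fun x => (hmemB x).trans (hmemS x).symm)
  exact PySem.List.sorted_id_eq_of_perm_of_pairwise _ _ hperm (hsweep.1.imp le_of_lt)

-- a dict built from a nonempty association list has at least one value
theorem pv_values_ne_nil (l : List (String × Int × Int)) (h : l ≠ []) :
    (PySem.Dict.ofList l).values ≠ [] := by
  have hk : (PySem.Dict.ofList l).keys = PySem.Set.ofList (l.map Prod.fst) := by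
    simpa [PySem.Dict.ofList, PySem.Dict.keys_empty] using
      PySem.Dict.keys_foldl_insert_key (l := l) (key := Prod.fst)
        (f := fun d x => x.2) (d := PySem.Dict.empty)
  intro hv
  have h2 : (PySem.Dict.ofList l).keys = [] := by
    simp only [PySem.Dict.keys, PySem.Dict.values] at hk hv ⊢
    cases hitems : (PySem.Dict.ofList l).items with
    | nil => simp
    | cons a t => rw [hitems] at hv; simp at hv
  rw [hk] at h2
  cases l with
  | nil => exact h rfl
  | cons a t => rw [List.map_cons, PySem.Set.ofList_cons] at h2; simp at h2

-- ===== VERDICT (by name: the statement is the Claim_ definition above) =====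
theorem get_affected_positions_spec : Claim_equal_get_affected_positions := by
  intro mutations genome_len k protein_regions _
  show get_affected_positions mutations genome_len k protein_regions
      = get_affected_positions_alt mutations genome_len k protein_regions
  unfold get_affected_positions get_affected_positions_alt
  cases protein_regions with
  | none =>
    exact pv_core mutations genome_len _ none (by simp)
  | some l =>
    by_cases hl : l.isEmpty = true
    · have hnil : l = [] := by simpa [List.isEmpty_iff] using hl
      subst hnil
      simpa using pv_core mutations genome_len (PySem.Int.floordiv k 2) none (by simp)
    · have hlne : l ≠ [] := by simpa [List.isEmpty_iff] using hl
      have hv := pv_values_ne_nil l hlne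
      have := pv_core mutations genome_len (PySem.Int.floordiv k 2)
        (some ((PySem.Dict.ofList l).values))
        (by intro regs hh; obtain rfl : (PySem.Dict.ofList l).values = regs := by injection hh
            exact hv)
      simpa [hl] using this
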